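-- pv_equiv track=rewrite | github.com/akalswl14/baekjoon | 2628.py | cutCol
-- ===== SOURCE A (Python) =====
-- def cutCol(inputArr, cutSpot):
--     rtnArr = []
--     maxSize = 0
--     for i in inputArr:
--         startRow, startCol, endRow, endCol, x, y, size = i
--         if cutSpot > startCol and cutSpot < endCol:
--             splitedSize = (cutSpot - startCol) * x
--             splited1 = [
--                 startRow,
--                 startCol,
--                 endRow,
--                 cutSpot,
--                 x,
--                 cutSpot - startCol,
--                 splitedSize,
--             ]
--             maxSize = max(maxSize, splitedSize)
--             splitedSize = (endCol - cutSpot) * x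
--             splited2 = [
--                 startRow,
--                 cutSpot,
--                 endRow,
--                 endCol,
--                 x,
--                 endCol - cutSpot,
--                 splitedSize,
--             ]
--             maxSize = max(maxSize, splitedSize)
--             rtnArr.append(splited1)
--             rtnArr.append(splited2)
--         else:
--             rtnArr.append(i)
--             maxSize = max(maxSize, size)
--     return [rtnArr, maxSize]
-- ===== SOURCE B (Python) =====
-- def cutCol(inputArr, cutSpot):
--     # Divide and conquer on index ranges: solve each half independently,
--     # then merge (concatenate pieces, take the larger max).
--     def solve(lo, hi):
--         if lo == hi:
--             return [], 0
--         if hi - lo == 1: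
--             startRow, startCol, endRow, endCol, x, y, size = inputArr[lo]
--             if startCol < cutSpot < endCol:
--                 left = [startRow, startCol, endRow, cutSpot,
--                         x, cutSpot - startCol, (cutSpot - startCol) * x]
--                 right = [startRow, cutSpot, endRow, endCol,
--                          x, endCol - cutSpot, (endCol - cutSpot) * x]
--                 return [left, right], max(left[6], right[6])
--             return [inputArr[lo]], size
--         mid = (lo + hi) // 2
--         leftArr, leftMax = solve(lo, mid)
--         rightArr, rightMax = solve(mid, hi)
--         return leftArr + rightArr, max(leftMax, rightMax)
--     rtnArr, best = solve(0, len(inputArr))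
--     return [rtnArr, max(0, best)]
-- ===== Notes on version B (the rewrite author's own statement) =====
-- stated objective: alternative
-- what changed: B replaces A's single left-to-right fold (tracking maxSize inline) with a divide-and-conquer over index ranges: each half is solved recursively and the results are merged by concatenation and a pairwise max, with the 0 seed applied once at the end.
import Mathlib
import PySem

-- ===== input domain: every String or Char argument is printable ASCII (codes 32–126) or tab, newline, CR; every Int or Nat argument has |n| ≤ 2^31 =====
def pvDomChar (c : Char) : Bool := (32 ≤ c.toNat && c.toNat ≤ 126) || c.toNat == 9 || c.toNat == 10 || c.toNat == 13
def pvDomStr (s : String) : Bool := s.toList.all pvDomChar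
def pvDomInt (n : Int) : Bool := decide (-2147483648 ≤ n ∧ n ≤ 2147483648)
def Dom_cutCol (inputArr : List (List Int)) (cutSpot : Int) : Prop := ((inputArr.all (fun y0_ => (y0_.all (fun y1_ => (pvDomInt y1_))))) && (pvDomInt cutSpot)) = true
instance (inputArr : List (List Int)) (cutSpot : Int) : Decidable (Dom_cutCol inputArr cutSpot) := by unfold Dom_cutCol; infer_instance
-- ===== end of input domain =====

-- B replaces A's left-to-right fold by a divide-and-conquer over index ranges; same return value.

-- ===== PORT A =====
-- one loop iteration of A: unpack the 7 fields, split or keep, update maxSize as A does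
def cutColStep (cutSpot : Int) (st : List (List Int) × Int) (i : List Int) : List (List Int) × Int :=
  match i with
  | [startRow, startCol, endRow, endCol, x, _y, size] =>
    if cutSpot > startCol ∧ cutSpot < endCol then
      let splitedSize1 := (cutSpot - startCol) * x
      let splited1 := [startRow, startCol, endRow, cutSpot, x, cutSpot - startCol, splitedSize1]
      let m1 := max st.2 splitedSize1
      let splitedSize2 := (endCol - cutSpot) * x
      let splited2 := [startRow, cutSpot, endRow, endCol, x, endCol - cutSpot, splitedSize2]
      (st.1 ++ [splited1, splited2], max m1 splitedSize2)
    else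
      (st.1 ++ [i], max st.2 size)
  | _ => st  -- unreachable under Pre_cutCol (Python raises ValueError on unpacking)

def cutCol (inputArr : List (List Int)) (cutSpot : Int) : List (List Int) × Int :=
  inputArr.foldl (cutColStep cutSpot) ([], 0)

-- ===== PORT B =====
-- B's inner solve(lo, hi): divide and conquer on the index range [lo, hi)
def cutColSolve (inputArr : List (List Int)) (cutSpot : Int) (lo hi : Nat) : List (List Int) × Int :=
  if hi ≤ lo then ([], 0)  -- Python tests lo == hi; '≤' is the totality guard (lo ≤ hi at every call)
  else if hi - lo = 1 then
    match PySem.List.pyGet? inputArr (lo : Int) with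
    | some i =>
      match i with
      | [startRow, startCol, endRow, endCol, x, _y, size] =>
        if startCol < cutSpot ∧ cutSpot < endCol then
          ([[startRow, startCol, endRow, cutSpot, x, cutSpot - startCol, (cutSpot - startCol) * x],
            [startRow, cutSpot, endRow, endCol, x, endCol - cutSpot, (endCol - cutSpot) * x]],
           max ((cutSpot - startCol) * x) ((endCol - cutSpot) * x))
        else ([i], size)
      | _ => ([i], 0)  -- unreachable under Pre_cutCol (Python raises ValueError on unpacking)
    | none => ([], 0)  -- unreachable: lo < inputArr.length at every call
  else
    let mid := (lo + hi) / 2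
    let L := cutColSolve inputArr cutSpot lo mid
    let R := cutColSolve inputArr cutSpot mid hi
    (L.1 ++ R.1, max L.2 R.2)
termination_by hi - lo
decreasing_by all_goals omega

def cutCol_alt (inputArr : List (List Int)) (cutSpot : Int) : List (List Int) × Int :=
  let r := cutColSolve inputArr cutSpot 0 inputArr.length
  (r.1, max 0 r.2)

-- ===== PRECONDITION & SPEC =====
-- Pre_ excludes rows that are not 7-tuples: on those Python A raises ValueError while unpacking.
def Pre_cutCol (inputArr : List (List Int)) (cutSpot : Int) : Prop :=
  ∀ i ∈ inputArr, i.length = 7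
instance (inputArr : List (List Int)) (cutSpot : Int) : Decidable (Pre_cutCol inputArr cutSpot) := by unfold Pre_cutCol; infer_instance
def pvWitness_cutCol : List (List Int) × Int := ([[0, 0, 4, 5, 4, 5, 20], [0, 1, 2, 3, 2, 2, 4]], 2)

def Spec_cutCol (inputArr : List (List Int)) (cutSpot : Int) (out : List (List Int) × Int) : Prop := out = cutCol_alt inputArr cutSpot
instance (inputArr : List (List Int)) (cutSpot : Int) (out : List (List Int) × Int) : Decidable (Spec_cutCol inputArr cutSpot out) := by unfold Spec_cutCol; infer_instance

-- ===== CLAIM (what is proved, stated in full; the proofs are below) =====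
def Claim_equal_cutCol : Prop := ∀ (inputArr : List (List Int)) (cutSpot : Int), Dom_cutCol inputArr cutSpot → Pre_cutCol inputArr cutSpot → Spec_cutCol inputArr cutSpot (cutCol inputArr cutSpot)

-- ===== LEMMAS AND PROOFS =====

-- proof-side helpers: the pieces a rectangle contributes, and a rectangle's size field
def cutColPieces (cutSpot : Int) (i : List Int) : List (List Int) :=
  match i with
  | [startRow, startCol, endRow, endCol, x, _y, _size] =>
    if startCol < cutSpot ∧ cutSpot < endCol then
      [[startRow, startCol, endRow, cutSpot, x, cutSpot - startCol, (cutSpot - startCol) * x],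
       [startRow, cutSpot, endRow, endCol, x, endCol - cutSpot, (endCol - cutSpot) * x]]
    else [i]
  | _ => [i]

def cutColSz (rect : List Int) : Int := (PySem.List.pyGet? rect 6).getD 0

-- A's fold from any accumulator equals the flatMap of pieces, with maxSize folded on
theorem cutCol_fold_eq (cutSpot : Int) (l : List (List Int)) (acc : List (List Int)) (m : Int)
    (h : ∀ i ∈ l, i.length = 7) :
    l.foldl (cutColStep cutSpot) (acc, m) =
      (acc ++ l.flatMap (cutColPieces cutSpot),
       ((l.flatMap (cutColPieces cutSpot)).map cutColSz).foldl max m) := by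
  induction l generalizing acc m with
  | nil => simp
  | cons i t ih =>
    have hi : i.length = 7 := h i (by simp)
    have ht : ∀ j ∈ t, j.length = 7 := fun j hj => h j (by simp [hj])
    match i, hi with
    | [a, b, c, d, x, y, s], _ =>
      by_cases hc : cutSpot > b ∧ cutSpot < d
      · simp only [List.foldl_cons, cutColStep, hc]
        rw [ih _ _ ht]
        simp [cutColSz, PySem.List.pyGet?, PySem.List.pyIdx?, List.flatMap_cons, cutColPieces,
          if_pos (And.intro hc.1 hc.2), List.append_assoc]
      · have hc' : ¬ (b < cutSpot ∧ cutSpot < d) := fun h' => hc ⟨h'.1, h'.2⟩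
        simp only [List.foldl_cons, cutColStep, if_neg hc]
        rw [ih _ _ ht]
        simp [cutColSz, PySem.List.pyGet?, PySem.List.pyIdx?, List.flatMap_cons, cutColPieces,
          if_neg hc', List.append_assoc]

-- B's solve on [lo, hi) produces the pieces of that segment, and its max combines with any
-- nonnegative seed exactly as folding max over the piece sizes does
theorem cutColSolve_eq (inputArr : List (List Int)) (cutSpot : Int)
    (hpre : ∀ i ∈ inputArr, i.length = 7) :
    ∀ n lo hi, hi - lo = n → lo ≤ hi → hi ≤ inputArr.length →
      (cutColSolve inputArr cutSpot lo hi).1 =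
        ((inputArr.drop lo).take (hi - lo)).flatMap (cutColPieces cutSpot) ∧
      ∀ a : Int, 0 ≤ a → max a (cutColSolve inputArr cutSpot lo hi).2 =
        ((((inputArr.drop lo).take (hi - lo)).flatMap (cutColPieces cutSpot)).map cutColSz).foldl max a := by
  intro n
  induction n using Nat.strong_induction_on with
  | _ n IH =>
    intro lo hi hn hle hlen
    by_cases h0 : hi ≤ lo
    · have : hi = lo := le_antisymm h0 hle
      subst this
      rw [cutColSolve]
      simp
    · by_cases h1 : hi - lo = 1
      · have hlt : lo < inputArr.length := by omega
        have hget : PySem.List.pyGet? inputArr (lo : Int) = some inputArr[lo] := by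
          rw [PySem.List.pyGet?_natCast]
          exact List.getElem?_eq_getElem hlt
        have hseg : (inputArr.drop lo).take (hi - lo) = [inputArr[lo]] := by
          rw [h1]
          rw [List.take_one]
          have : (inputArr.drop lo).head? = some inputArr[lo] := by
            rw [List.head?_drop]
            exact List.getElem?_eq_getElem hlt
          simp [this]
        have h7 : (inputArr[lo]).length = 7 := hpre _ (List.getElem_mem hlt)
        rw [cutColSolve]
        simp only [if_neg h0, if_pos h1, hget, hseg]
        match hi' : inputArr[lo], h7 with
        | [a, b, c, d, x, y, s], _ =>
          by_cases hc : b < cutSpot ∧ cutSpot < d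
          · simp only [if_pos hc]
            constructor
            · simp [cutColPieces, if_pos hc]
            · intro a0 _
              simp [cutColPieces, if_pos hc, cutColSz, PySem.List.pyGet?, PySem.List.pyIdx?,
                max_assoc]
          · simp only [if_neg hc]
            constructor
            · simp [cutColPieces, if_neg hc]
            · intro a0 _
              simp [cutColPieces, if_neg hc, cutColSz, PySem.List.pyGet?, PySem.List.pyIdx?]
      · have h2 : 2 ≤ hi - lo := by omega
        set mid := (lo + hi) / 2 with hmid
        have hb : lo < mid ∧ mid < hi := by constructor <;> omega
        have hL := IH (mid - lo) (by omega) lo mid rfl (by omega) (by omega)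
        have hR := IH (hi - mid) (by omega) mid hi rfl (by omega) (by omega)
        have hsegsplit : (inputArr.drop lo).take (hi - lo) =
            (inputArr.drop lo).take (mid - lo) ++ (inputArr.drop mid).take (hi - mid) := by
          have h3 : hi - lo = (mid - lo) + (hi - mid) := by omega
          have h4 : List.drop (mid - lo) (List.drop lo inputArr) = List.drop mid inputArr := by
            rw [List.drop_drop]
            congr 1
            omega
          rw [h3, List.take_add, h4]
        rw [cutColSolve]
        simp only [if_neg h0, if_neg h1, ← hmid]
        constructor
        · simp only [hsegsplit, List.flatMap_append]
          rw [hL.1, hR.1]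
        · intro a ha
          simp only [hsegsplit, List.flatMap_append, List.map_append, List.foldl_append]
          rw [← hL.2 a ha,
              ← hR.2 (max a (cutColSolve inputArr cutSpot lo mid).2) (le_trans ha (le_max_left _ _))]
          exact (max_assoc _ _ _).symm

-- ===== VERDICT (by name: the statement is the Claim_ definition above) =====
theorem cutCol_spec : Claim_equal_cutCol := by
  intro inputArr cutSpot _ hpre
  unfold Spec_cutCol cutCol cutCol_alt
  rw [cutCol_fold_eq cutSpot inputArr [] 0 hpre]
  have h := cutColSolve_eq inputArr cutSpot hpre (inputArr.length) 0 inputArr.length rfl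
    (Nat.zero_le _) (le_refl _)
  simp only [List.drop_zero, Nat.sub_zero, List.take_length] at h
  refine Prod.ext ?_ ?_
  · simp [h.1]
  · simpa using (h.2 0 (le_refl 0)).symm
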